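-- pv_equiv track=rewrite | github.com/cgml/algorithms-python | src/cgml/crackingcodinginterview/treesandgraphs/_4_1_dgraph_route_bfs.py | bfs
-- ===== SOURCE A (Python) =====
-- def bfs(g,s,t):
--     q,v = [s],set()
--     while q:
--         node = q.pop(0)
--         if node==t: return True
--         if node in v: continue
--         q,v = q+g.get(node,[]), v.union([node])
--     return False
-- ===== SOURCE B (Python) =====
-- def bfs(g, s, t):
--     reach = {s}
--     while True:
--         new = {n for u in reach for n in g.get(u, []) if n not in reach}
--         if not new:
--             return t in reach
--         reach |= new
-- ===== Notes on version B (the rewrite author's own statement) =====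
-- stated objective: alternative
-- what changed: Replaces the explicit FIFO queue with visited-set bookkeeping by a whole-set fixpoint saturation: repeatedly add all unseen neighbours of the current reachable set until nothing new appears, then test membership of t.
import Mathlib
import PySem

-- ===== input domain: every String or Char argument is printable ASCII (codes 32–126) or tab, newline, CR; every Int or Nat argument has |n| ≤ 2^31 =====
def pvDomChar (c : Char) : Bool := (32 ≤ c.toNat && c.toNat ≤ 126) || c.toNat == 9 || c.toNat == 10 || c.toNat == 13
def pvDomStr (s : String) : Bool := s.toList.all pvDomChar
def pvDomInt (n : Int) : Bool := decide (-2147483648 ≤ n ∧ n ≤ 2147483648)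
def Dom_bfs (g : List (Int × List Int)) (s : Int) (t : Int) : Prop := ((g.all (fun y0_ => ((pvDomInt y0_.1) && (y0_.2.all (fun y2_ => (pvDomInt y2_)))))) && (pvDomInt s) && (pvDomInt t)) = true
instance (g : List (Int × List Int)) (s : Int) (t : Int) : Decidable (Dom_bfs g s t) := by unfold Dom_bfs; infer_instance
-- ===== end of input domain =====

-- B replaces A's FIFO-queue BFS by whole-set fixpoint saturation (no queue, no per-node pop);
-- equal return value on every input, no speed claim.

-- ===== PORT A =====
-- g.get(node, [])
def bfsAdj (g : List (Int × List Int)) (node : Int) : List Int :=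
  (PySem.Dict.mk g).getD node []

-- the 'while q' loop of A; fuel only makes the recursion total (proved never exhausted below)
def bfsLoopA (g : List (Int × List Int)) (t : Int) :
    Nat → List Int → PySem.Set Int → Bool
  | 0, _, _ => false
  | fuel+1, q, v =>
    match q with
    | [] => false
    | node :: q' =>
      if node = t then true
      else if node ∈ v then bfsLoopA g t fuel q' v
      else bfsLoopA g t fuel (q' ++ bfsAdj g node) (PySem.Set.union v [node])

-- fuel bound for A's loop: |q| + |{keys not yet visited}| * (total adjacency size + 1)
def bfsC (g : List (Int × List Int)) : Nat :=
  (g.map (fun p => p.2.length)).sum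

def bfsKeys (g : List (Int × List Int)) : List Int :=
  PySem.Set.ofList (g.map Prod.fst)

def bfsMu (g : List (Int × List Int)) (q : List Int) (v : PySem.Set Int) : Nat :=
  q.length + ((bfsKeys g).filter (fun k => decide (k ∉ v))).length * (bfsC g + 1)

def bfs (g : List (Int × List Int)) (s : Int) (t : Int) : Bool :=
  bfsLoopA g t (bfsMu g [s] PySem.Set.empty + 1) [s] PySem.Set.empty

-- ===== PORT B =====
-- {n for u in reach for n in g.get(u, []) if n not in reach}
def bfsFrontier (g : List (Int × List Int)) (r : PySem.Set Int) : PySem.Set Int :=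
  PySem.Set.ofList ((r.flatMap (fun u => (PySem.Dict.mk g).getD u [])).filter (fun n => decide (n ∉ r)))

-- fuel bound for B's loop: number of universe elements not yet reached
def bfsUniv (g : List (Int × List Int)) (s : Int) : List Int :=
  PySem.Set.ofList (s :: g.flatMap (fun p => p.2))

def bfsNu (g : List (Int × List Int)) (s : Int) (r : PySem.Set Int) : Nat :=
  ((bfsUniv g s).filter (fun n => decide (n ∉ r))).length

-- the 'while True' saturation loop of B; fuel only makes the recursion total
def bfsLoopB (g : List (Int × List Int)) (s : Int) (t : Int) :
    Nat → PySem.Set Int → Bool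
  | 0, r => decide (t ∈ r)
  | fuel+1, r =>
    let nw := bfsFrontier g r
    if nw = [] then decide (t ∈ r)
    else bfsLoopB g s t fuel (PySem.Set.union r nw)

def bfs_alt (g : List (Int × List Int)) (s : Int) (t : Int) : Bool :=
  bfsLoopB g s t (bfsNu g s (PySem.Set.ofList [s]) + 1) (PySem.Set.ofList [s])

-- ===== PRECONDITION & SPEC =====
def Spec_bfs (g : List (Int × List Int)) (s : Int) (t : Int) (out : Bool) : Prop := out = bfs_alt g s t
instance (g : List (Int × List Int)) (s : Int) (t : Int) (out : Bool) : Decidable (Spec_bfs g s t out) := by unfold Spec_bfs; infer_instance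

-- ===== CLAIM (what is proved, stated in full; the proofs are below) =====
def Claim_equal_bfs : Prop := ∀ (g : List (Int × List Int)) (s : Int) (t : Int), Dom_bfs g s t → Spec_bfs g s t (bfs g s t)

-- ===== LEMMAS AND PROOFS =====

-- one graph edge: b is a neighbour of a
def GStep (g : List (Int × List Int)) (a b : Int) : Prop := b ∈ bfsAdj g a

-- union with a singleton is insertion
theorem bfs_mem_union_single {v : PySem.Set Int} {x n : Int} :
    x ∈ PySem.Set.union v [n] ↔ x ∈ v ∨ x = n := by
  simp [PySem.Set.mem_union]

-- g.get(k, []) is [] or one of g's value lists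
theorem bfsAdj_cases (g : List (Int × List Int)) (k : Int) :
    bfsAdj g k = [] ∨ bfsAdj g k ∈ g.map Prod.snd := by
  induction g with
  | nil => left; rfl
  | cons p rest ih =>
    simp only [bfsAdj, PySem.Dict.getD_eq_get?_getD] at *
    rw [show (PySem.Dict.mk (p :: rest)) = PySem.Dict.mk ((p.1, p.2) :: rest) by rfl,
        PySem.Dict.get?_mk_cons]
    by_cases h : p.1 == k
    · simp [h]
    · simp only [h]; simpa using ih.imp id (fun h => Or.inr h)

theorem bfsAdj_len_le (g : List (Int × List Int)) (k : Int) :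
    (bfsAdj g k).length ≤ bfsC g := by
  rcases bfsAdj_cases g k with h | h
  · simp [h]
  · rcases List.mem_map.1 h with ⟨p, hp, hpe⟩
    exact List.le_sum_of_mem (List.mem_map.2 ⟨p, hp, by rw [hpe]⟩)

theorem bfsAdj_of_not_key {g : List (Int × List Int)} {k : Int}
    (h : k ∉ g.map Prod.fst) : bfsAdj g k = [] := by
  induction g with
  | nil => rfl
  | cons p rest ih =>
    simp only [List.map_cons, List.mem_cons, not_or] at h
    simp only [bfsAdj, PySem.Dict.getD_eq_get?_getD] at *
    rw [show (PySem.Dict.mk (p :: rest)) = PySem.Dict.mk ((p.1, p.2) :: rest) by rfl,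
        PySem.Dict.get?_mk_cons]
    have hne : (p.1 == k) = false := beq_eq_false_iff_ne.2 (Ne.symm h.1)
    simp only [hne, Bool.false_eq_true, reduceIte]
    exact ih h.2

theorem bfsAdj_mem_flat {g : List (Int × List Int)} {k x : Int}
    (h : x ∈ bfsAdj g k) : x ∈ g.flatMap (fun p => p.2) := by
  rcases bfsAdj_cases g k with h0 | h0
  · rw [h0] at h; cases h
  · rcases List.mem_map.1 h0 with ⟨p, hp, hpe⟩
    exact List.mem_flatMap.2 ⟨p, hp, hpe ▸ h⟩

-- filter length is monotone / strictly decreases when an element drops out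
theorem bfs_filter_len_mono {p p' : Int → Bool} (L : List Int)
    (h : ∀ x, p' x = true → p x = true) :
    (L.filter p').length ≤ (L.filter p).length := by
  induction L with
  | nil => simp
  | cons a L ih =>
    by_cases ha : p' a = true
    · simp [ha, h a ha]; omega
    · have : p' a = false := by simpa using ha
      by_cases hpa : p a = true <;>
        simp [this, hpa] <;> omega

theorem bfs_filter_len_lt {p p' : Int → Bool} {L : List Int} {a : Int}
    (h : ∀ x, p' x = true → p x = true) (haL : a ∈ L)
    (hpa : p a = true) (hpa' : p' a = false) :
    (L.filter p').length < (L.filter p).length := by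
  induction L with
  | nil => cases haL
  | cons b L ih =>
    rcases List.mem_cons.1 haL with rfl | hb
    · have := bfs_filter_len_mono L h
      simp [hpa, hpa']; omega
    · by_cases hb' : p' b = true
      · simp [hb', h b hb']; exact ih hb
      · have hb'' : p' b = false := by simpa using hb'
        by_cases hpb : p b = true <;>
          simp [hb'', hpb] <;> [skip; exact ih hb]
        have := ih hb; omega

-- a set closed under adjacency swallows every reachable node
theorem bfs_reach_closed {g : List (Int × List Int)} {V : List Int}
    (hcl : ∀ u ∈ V, ∀ n ∈ bfsAdj g u, n ∈ V) {x t : Int} (hx : x ∈ V)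
    (h : Relation.ReflTransGen (GStep g) x t) : t ∈ V := by
  induction h with
  | refl => exact hx
  | tail _ h2 ih => exact hcl _ ih _ h2

-- A's measure drops at every expansion step
theorem bfsMu_expand (g : List (Int × List Int)) (q' : List Int)
    (v : PySem.Set Int) (node : Int) (hnv : node ∉ v) :
    bfsMu g (q' ++ bfsAdj g node) (PySem.Set.union v [node]) + 1 ≤
      bfsMu g (node :: q') v := by
  have hmono : ∀ x : Int, decide (x ∉ PySem.Set.union v [node]) = true →
      decide (x ∉ v) = true := by
    intro x hx
    simp only [decide_eq_true_eq, bfs_mem_union_single] at *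
    exact fun h => hx (Or.inl h)
  by_cases hk : node ∈ bfsKeys g
  · -- node is a key: the key-filter strictly shrinks, paying for the enqueued list
    have hlt := bfs_filter_len_lt (L := bfsKeys g) (a := node) hmono hk
      (by simpa using hnv) (by simp [PySem.Set.mem_union])
    have hlen := bfsAdj_len_le g node
    simp only [bfsMu, List.length_append, List.length_cons]
    have h1 : ((bfsKeys g).filter (fun k => decide (k ∉ PySem.Set.union v [node]))).length + 1 ≤
        ((bfsKeys g).filter (fun k => decide (k ∉ v))).length := hlt
    nlinarith [h1, hlen]
  · -- node is not a key: adjacency is empty and the filter cannot grow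
    have hadj : bfsAdj g node = [] := by
      apply bfsAdj_of_not_key
      intro hmem
      exact hk (by simpa [bfsKeys, PySem.Set.mem_ofList] using hmem)
    have hm := bfs_filter_len_mono (L := bfsKeys g) hmono
    simp only [bfsMu, hadj, List.append_nil, List.length_cons]
    nlinarith [hm]

-- main loop invariant for A: with enough fuel, the loop answers reachability from q ∪ v
theorem bfsLoopA_iff (g : List (Int × List Int)) (t : Int) :
    ∀ (fuel : Nat) (q : List Int) (v : PySem.Set Int),
      (∀ u ∈ v, ∀ n ∈ bfsAdj g u, n ∈ q ∨ n ∈ v) → t ∉ v →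
      bfsMu g q v + 1 ≤ fuel →
      (bfsLoopA g t fuel q v = true ↔
        ∃ x, (x ∈ q ∨ x ∈ v) ∧ Relation.ReflTransGen (GStep g) x t) := by
  intro fuel
  induction fuel with
  | zero => intro q v _ _ h; omega
  | succ fuel ih =>
    intro q v hinv htv hfuel
    match q with
    | [] =>
      simp only [bfsLoopA, Bool.false_eq_true, false_iff]
      rintro ⟨x, hx, hr⟩
      rcases hx with hx | hx
      · cases hx
      · exact htv (bfs_reach_closed (fun u hu n hn => by
          rcases hinv u hu n hn with h | h
          · cases h
          · exact h) hx hr)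
    | node :: q' =>
      by_cases hnt : node = t
      · apply iff_of_true
        · simp [bfsLoopA, hnt]
        · exact ⟨node, Or.inl List.mem_cons_self,
            by rw [hnt]⟩
      · by_cases hnv : node ∈ v
        · -- visited: skip
          rw [show bfsLoopA g t (fuel+1) (node :: q') v = bfsLoopA g t fuel q' v by
            simp [bfsLoopA, hnt, hnv]]
          have hmu : bfsMu g q' v + 1 ≤ fuel := by
            simp only [bfsMu, List.length_cons] at hfuel; simp only [bfsMu]; omega
          rw [ih q' v (fun u hu n hn => by
                rcases hinv u hu n hn with h | h
                · rcases List.mem_cons.1 h with rfl | h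
                  · exact Or.inr hnv
                  · exact Or.inl h
                · exact Or.inr h) htv hmu]
          constructor
          · rintro ⟨x, hx, hr⟩; exact ⟨x, hx.imp (fun h => List.mem_cons_of_mem _ h) id, hr⟩
          · rintro ⟨x, hx, hr⟩
            rcases hx with hx | hx
            · rcases List.mem_cons.1 hx with rfl | hx
              · exact ⟨x, Or.inr hnv, hr⟩
              · exact ⟨x, Or.inl hx, hr⟩
            · exact ⟨x, Or.inr hx, hr⟩
        · -- new node: expand
          rw [show bfsLoopA g t (fuel+1) (node :: q') v =
              bfsLoopA g t fuel (q' ++ bfsAdj g node) (PySem.Set.union v [node]) by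
            simp [bfsLoopA, hnt, hnv]]
          have hmu : bfsMu g (q' ++ bfsAdj g node) (PySem.Set.union v [node]) + 1 ≤ fuel := by
            have := bfsMu_expand g q' v node hnv; omega
          rw [ih _ _ (fun u hu n hn => by
                rcases bfs_mem_union_single.1 hu with hu | rfl
                · rcases hinv u hu n hn with h | h
                  · rcases List.mem_cons.1 h with rfl | h
                    · exact Or.inr (bfs_mem_union_single.2 (Or.inr rfl))
                    · exact Or.inl (List.mem_append_left _ h)
                  · exact Or.inr (bfs_mem_union_single.2 (Or.inl h))
                · exact Or.inl (List.mem_append_right _ hn))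
              (fun h => by
                rcases bfs_mem_union_single.1 h with h | h
                · exact htv h
                · exact hnt h.symm) hmu]
          constructor
          · rintro ⟨x, hx, hr⟩
            rcases hx with hx | hx
            · rcases List.mem_append.1 hx with hx | hx
              · exact ⟨x, Or.inl (List.mem_cons_of_mem _ hx), hr⟩
              · exact ⟨node, Or.inl List.mem_cons_self,
                  Relation.ReflTransGen.head (hx : GStep g node x) hr⟩
            · rcases bfs_mem_union_single.1 hx with hx | rfl
              · exact ⟨x, Or.inr hx, hr⟩
              · exact ⟨x, Or.inl List.mem_cons_self, hr⟩
          · rintro ⟨x, hx, hr⟩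
            rcases hx with hx | hx
            · rcases List.mem_cons.1 hx with rfl | hx
              · exact ⟨x, Or.inr (bfs_mem_union_single.2 (Or.inr rfl)), hr⟩
              · exact ⟨x, Or.inl (List.mem_append_left _ hx), hr⟩
            · exact ⟨x, Or.inr (bfs_mem_union_single.2 (Or.inl hx)), hr⟩

-- membership in B's frontier set
theorem bfsFrontier_mem {g : List (Int × List Int)} {r : PySem.Set Int} {n : Int} :
    n ∈ bfsFrontier g r ↔ (∃ u ∈ r, n ∈ bfsAdj g u) ∧ n ∉ r := by
  simp [bfsFrontier, PySem.Set.mem_ofList, List.mem_filter, List.mem_flatMap, bfsAdj,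
    and_comm]

-- main loop invariant for B: with enough fuel, saturation answers reachability from r
theorem bfsLoopB_iff (g : List (Int × List Int)) (s t : Int) :
    ∀ (fuel : Nat) (r : PySem.Set Int),
      (∀ x ∈ r, x ∈ bfsUniv g s) → bfsNu g s r + 1 ≤ fuel →
      (bfsLoopB g s t fuel r = true ↔
        ∃ x ∈ r, Relation.ReflTransGen (GStep g) x t) := by
  intro fuel
  induction fuel with
  | zero => intro r _ h; omega
  | succ fuel ih =>
    intro r hsub hfuel
    by_cases hemp : bfsFrontier g r = []
    · rw [show bfsLoopB g s t (fuel+1) r = decide (t ∈ r) by simp [bfsLoopB, hemp]]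
      have hcl : ∀ u ∈ r, ∀ n ∈ bfsAdj g u, n ∈ r := by
        intro u hu n hn
        by_contra hnr
        have : n ∈ bfsFrontier g r := bfsFrontier_mem.2 ⟨⟨u, hu, hn⟩, hnr⟩
        rw [hemp] at this; cases this
      simp only [decide_eq_true_eq]
      constructor
      · intro h; exact ⟨t, h, Relation.ReflTransGen.refl⟩
      · rintro ⟨x, hx, hr⟩; exact bfs_reach_closed hcl hx hr
    · rw [show bfsLoopB g s t (fuel+1) r =
          bfsLoopB g s t fuel (PySem.Set.union r (bfsFrontier g r)) by
        simp [bfsLoopB, hemp]]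
      obtain ⟨a, ha⟩ := List.exists_mem_of_ne_nil _ hemp
      obtain ⟨⟨u, hu, hau⟩, hanr⟩ := bfsFrontier_mem.1 ha
      have hauniv : a ∈ bfsUniv g s := by
        simp only [bfsUniv, PySem.Set.mem_ofList, List.mem_cons]
        exact Or.inr (bfsAdj_mem_flat hau)
      have hsub' : ∀ x ∈ PySem.Set.union r (bfsFrontier g r), x ∈ bfsUniv g s := by
        intro x hx
        rcases (PySem.Set.mem_union _ _ _).1 hx with hx | hx
        · exact hsub x hx
        · obtain ⟨⟨w, hw, hxw⟩, _⟩ := bfsFrontier_mem.1 hx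
          simp only [bfsUniv, PySem.Set.mem_ofList, List.mem_cons]
          exact Or.inr (bfsAdj_mem_flat hxw)
      have hnu : bfsNu g s (PySem.Set.union r (bfsFrontier g r)) < bfsNu g s r := by
        apply bfs_filter_len_lt (a := a)
        · intro x hx
          simp only [decide_eq_true_eq] at *
          exact fun hxr => hx ((PySem.Set.mem_union _ _ _).2 (Or.inl hxr))
        · exact hauniv
        · simpa using hanr
        · simp [PySem.Set.mem_union, ha]
      rw [ih _ hsub' (by omega)]
      constructor
      · rintro ⟨x, hx, hr⟩
        rcases (PySem.Set.mem_union _ _ _).1 hx with hx | hx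
        · exact ⟨x, hx, hr⟩
        · obtain ⟨⟨w, hw, hxw⟩, _⟩ := bfsFrontier_mem.1 hx
          exact ⟨w, hw, Relation.ReflTransGen.head (hxw : GStep g w x) hr⟩
      · rintro ⟨x, hx, hr⟩
        exact ⟨x, (PySem.Set.mem_union _ _ _).2 (Or.inl hx), hr⟩

-- ===== VERDICT (by name: the statement is the Claim_ definition above) =====
theorem bfs_spec : Claim_equal_bfs := by
  intro g s t _
  unfold Spec_bfs
  have hA := bfsLoopA_iff g t (bfsMu g [s] PySem.Set.empty + 1) [s] PySem.Set.empty
    (by intro u hu; simp [PySem.Set.empty] at hu)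
    (by simp [PySem.Set.empty])
    (le_refl _)
  have h0 : PySem.Set.ofList [s] = [s] := rfl
  have hB := bfsLoopB_iff g s t (bfsNu g s (PySem.Set.ofList [s]) + 1) (PySem.Set.ofList [s])
    (by intro x hx
        rw [h0] at hx
        obtain rfl := List.mem_singleton.1 hx
        simp [bfsUniv, PySem.Set.mem_ofList])
    (le_refl _)
  have hiff : bfs g s t = true ↔ bfs_alt g s t = true := by
    rw [show bfs g s t =
        bfsLoopA g t (bfsMu g [s] PySem.Set.empty + 1) [s] PySem.Set.empty from rfl, hA,
      show bfs_alt g s t =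
        bfsLoopB g s t (bfsNu g s (PySem.Set.ofList [s]) + 1) (PySem.Set.ofList [s]) from rfl,
      hB]
    constructor
    · rintro ⟨x, hx, hr⟩
      rcases hx with hx | hx
      · obtain rfl := List.mem_singleton.1 hx
        exact ⟨x, h0 ▸ List.mem_singleton.2 rfl, hr⟩
      · simp [PySem.Set.empty] at hx
    · rintro ⟨x, hx, hr⟩
      rw [h0] at hx
      obtain rfl := List.mem_singleton.1 hx
      exact ⟨x, Or.inl (List.mem_singleton.2 rfl), hr⟩
  cases h1 : bfs g s t <;> cases h2 : bfs_alt g s t <;> simp_all
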